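-- pv_equiv track=rewrite | github.com/Ketaki09/practice | ArrayBasics /rotateArray.py | reverse_chunks
-- ===== SOURCE A (Python) =====
-- def reverse_chunks(arr):
--     result = []
--     chunk = []
--
--     for num in arr:
--         if num == 0:
--             # Process the current chunk
--             if len(chunk) > 1:
--                 result.extend(chunk[::-1])
--             else:
--                 result.extend(chunk)
--             # Add the 0 itself
--             result.append(0)
--             # Reset chunk
--             chunk = []
--         else:
--             chunk.append(num)
--
--     # Process the last chunk (after the last 0, or whole array if no 0)
--     # if len(chunk) > 1:
--     result.extend(chunk[::-1])
--     # else: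
--         # result.extend(chunk)
--
--     return result
-- ===== SOURCE B (Python) =====
-- def reverse_chunks(arr):
--     # Recursive decomposition: split at the first zero; reverse the prefix,
--     # emit the zero, recurse on the rest. No zero: the whole array reversed.
--     if 0 not in arr:
--         return arr[::-1]
--     i = arr.index(0)
--     return arr[:i][::-1] + [0] + reverse_chunks(arr[i+1:])
-- ===== Notes on version B (the rewrite author's own statement) =====
-- stated objective: simpler
-- what changed: Replaced the imperative loop that maintains a result buffer and a chunk buffer with flush-on-zero logic by a direct recursion that splits the list at the first zero, reverses that prefix and recurses on the remainder.
import Mathlib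
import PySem

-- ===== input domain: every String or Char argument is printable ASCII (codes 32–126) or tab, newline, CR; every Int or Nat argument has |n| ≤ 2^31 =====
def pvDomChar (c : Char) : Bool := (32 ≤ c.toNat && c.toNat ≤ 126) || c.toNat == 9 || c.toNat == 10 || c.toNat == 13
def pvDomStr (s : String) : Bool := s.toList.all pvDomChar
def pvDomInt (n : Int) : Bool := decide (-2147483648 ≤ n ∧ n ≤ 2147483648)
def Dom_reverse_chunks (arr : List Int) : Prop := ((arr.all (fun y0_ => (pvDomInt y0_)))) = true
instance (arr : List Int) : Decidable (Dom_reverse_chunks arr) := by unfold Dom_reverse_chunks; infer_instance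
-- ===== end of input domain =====

-- B replaces A's buffer-and-flush loop by a recursion splitting at the first zero (simpler decomposition; return values proved equal).


-- ===== PORT A =====
-- literal port of A: fold over arr carrying (result, chunk); on 0 flush chunk
-- (reversed if its length exceeds 1) plus the 0; finally flush the last chunk reversed
def reverse_chunksStep (acc : List Int × List Int) (num : Int) : List Int × List Int :=
  if num = 0 then
    ((if acc.2.length > 1 then acc.1 ++ acc.2.reverse else acc.1 ++ acc.2) ++ [0], [])
  else
    (acc.1, acc.2 ++ [num])

def reverse_chunks (arr : List Int) : List Int :=
  let st := arr.foldl reverse_chunksStep ([], [])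
  st.1 ++ st.2.reverse

-- ===== PORT B =====
-- literal port of B: split at the first zero (list.index → List.idxOf;
-- arr[:i] → take i, arr[i+1:] → drop (i+1), [::-1] → reverse)
def reverse_chunks_alt (arr : List Int) : List Int :=
  if h : (0 : Int) ∈ arr then
    (arr.take (arr.idxOf 0)).reverse ++ [0] ++ reverse_chunks_alt (arr.drop (arr.idxOf 0 + 1))
  else
    arr.reverse
termination_by arr.length
decreasing_by
  have hlen : 0 < arr.length := List.length_pos_of_mem h
  simp [List.length_drop]; omega

-- ===== PRECONDITION & SPEC =====
def Spec_reverse_chunks (arr : List Int) (out : List Int) : Prop := out = reverse_chunks_alt arr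
instance (arr : List Int) (out : List Int) : Decidable (Spec_reverse_chunks arr out) := by unfold Spec_reverse_chunks; infer_instance

-- ===== CLAIM (what is proved, stated in full; the proofs are below) =====
def Claim_equal_reverse_chunks : Prop := ∀ (arr : List Int), Dom_reverse_chunks arr → Spec_reverse_chunks arr (reverse_chunks arr)

-- ===== LEMMAS AND PROOFS =====

-- B on a zero-free list is just the reversal
theorem alt_no_zero (arr : List Int) (h : (0 : Int) ∉ arr) :
    reverse_chunks_alt arr = arr.reverse := by
  rw [reverse_chunks_alt]; simp [h]

-- idxOf of the first zero after a zero-free prefix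
theorem idxOf_append_zero (c t : List Int) (hc : ∀ x ∈ c, x ≠ 0) :
    (c ++ 0 :: t).idxOf (0 : Int) = c.length := by
  induction c with
  | nil => simp
  | cons a c ih =>
      have ha : a ≠ 0 := hc a (by simp)
      simp only [List.cons_append, List.idxOf_cons]
      have hb : (a == (0 : Int)) = false := by simp [ha]
      simp [hb, ih (fun x hx => hc x (by simp [hx]))]

-- B's step at the first zero
theorem alt_split (c t : List Int) (hc : ∀ x ∈ c, x ≠ 0) :
    reverse_chunks_alt (c ++ 0 :: t) = c.reverse ++ [0] ++ reverse_chunks_alt t := by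
  rw [reverse_chunks_alt]
  have hmem : (0 : Int) ∈ c ++ 0 :: t := by simp
  rw [dif_pos hmem, idxOf_append_zero c t hc]
  have htake : (c ++ 0 :: t).take c.length = c := by simp
  have hdrop : (c ++ 0 :: t).drop (c.length + 1) = t := by
    have he : c ++ 0 :: t = (c ++ [0]) ++ t := by simp
    have hl : c.length + 1 = (c ++ [0]).length := by simp
    rw [he, hl, List.drop_left]
  rw [htake, hdrop]

-- the flush branch of A always emits the reversed chunk
theorem flush_eq (result chunk : List Int) :
    (if chunk.length > 1 then result ++ chunk.reverse else result ++ chunk)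
      = result ++ chunk.reverse := by
  by_cases h : chunk.length > 1
  · simp [h]
  · match chunk with
    | [] => simp
    | [a] => simp
    | a :: b :: c => simp at h

-- main loop invariant: A's fold from state (result, chunk) computes
-- result ++ B (chunk ++ arr), for any zero-free chunk
theorem loop_inv (arr : List Int) :
    ∀ (result chunk : List Int), (∀ x ∈ chunk, x ≠ 0) →
    (arr.foldl reverse_chunksStep (result, chunk)).1
      ++ (arr.foldl reverse_chunksStep (result, chunk)).2.reverse
      = result ++ reverse_chunks_alt (chunk ++ arr) := by
  induction arr with
  | nil =>
      intro result chunk hc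
      simp [alt_no_zero chunk (fun hz => hc 0 hz rfl)]
  | cons num t ih =>
      intro result chunk hc
      simp only [List.foldl_cons]
      by_cases hz : num = 0
      · subst hz
        rw [show reverse_chunksStep (result, chunk) 0
              = ((if chunk.length > 1 then result ++ chunk.reverse else result ++ chunk) ++ [0], [])
            from by simp [reverse_chunksStep]]
        rw [ih _ [] (by simp), flush_eq, alt_split chunk t hc]
        simp
      · rw [show reverse_chunksStep (result, chunk) num = (result, chunk ++ [num])
            from by simp [reverse_chunksStep, hz]]
        have hc' : ∀ x ∈ chunk ++ [num], x ≠ 0 := by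
          intro x hx
          rcases List.mem_append.mp hx with h | h
          · exact hc x h
          · simp at h; subst h; exact hz
        rw [ih _ _ hc']
        simp

-- ===== VERDICT (by name: the statement is the Claim_ definition above) =====
theorem reverse_chunks_spec : Claim_equal_reverse_chunks := by
  intro arr _
  unfold Spec_reverse_chunks reverse_chunks
  have h := loop_inv arr [] [] (by simp)
  simpa using h
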